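-- pv_equiv track=rewrite | github.com/mahiprime2001/Flames | FLAMES.py | remove_match_char
-- ===== SOURCE A (Python) =====
-- def remove_match_char(list1, list2):
--     """
--     Remove common characters between two lists.
--
--     Parameters:
--     - list1: First list of characters.
--     - list2: Second list of characters.
--
--     Returns:
--     - A tuple containing the concatenated list and a flag indicating whether common characters were found.
--     """
--     common_found = False
--
--     for char in list1[:]:
--         if char in list2:
--             common_found = True
--             list1.remove(char)
--             list2.remove(char)
--
--     result_list = list1 + ["*"] + list2
--     return result_list, common_found
-- ===== SOURCE B (Python) =====
-- def remove_match_char(list1, list2):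
--     """Counter-based re-implementation: one counting pass per list, one shared
--     budget, two linear skip passes.  Mutates list1/list2 in place like the
--     original (via slice assignment)."""
--     c1 = {}
--     for x in list1:
--         c1[x] = c1.get(x, 0) + 1
--     c2 = {}
--     for x in list2:
--         c2[x] = c2.get(x, 0) + 1
--     shared = {}
--     for x, n in c1.items():
--         if x in c2:
--             shared[x] = min(n, c2[x])
--
--     def strip(lst, budget):
--         out = []
--         for x in lst:
--             if budget.get(x, 0) > 0:
--                 budget[x] = budget.get(x, 0) - 1
--             else:
--                 out.append(x)
--         return out
--
--     new1 = strip(list1, dict(shared))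
--     new2 = strip(list2, dict(shared))
--     list1[:] = new1
--     list2[:] = new2
--     return new1 + ["*"] + new2, bool(shared)
-- ===== Notes on version B (the rewrite author's own statement) =====
-- stated objective: faster
-- what changed: Replaces the quadratic scan-and-remove loop (membership test plus two list.remove per match) by counting both lists once, taking the pointwise minimum as a shared budget, and filtering each list in a single linear pass that skips the first budgeted occurrences.
import Mathlib
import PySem

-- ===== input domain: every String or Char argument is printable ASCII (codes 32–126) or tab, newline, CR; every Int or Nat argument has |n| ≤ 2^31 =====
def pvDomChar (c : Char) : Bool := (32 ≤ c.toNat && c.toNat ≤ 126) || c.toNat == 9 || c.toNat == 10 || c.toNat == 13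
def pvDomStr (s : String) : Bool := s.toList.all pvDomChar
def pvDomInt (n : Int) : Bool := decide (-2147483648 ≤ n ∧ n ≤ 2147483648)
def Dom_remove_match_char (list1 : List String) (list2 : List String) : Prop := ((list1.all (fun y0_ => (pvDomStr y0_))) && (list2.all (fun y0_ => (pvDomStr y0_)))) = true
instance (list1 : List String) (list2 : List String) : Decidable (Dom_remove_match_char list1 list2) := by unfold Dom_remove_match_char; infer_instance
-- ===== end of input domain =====

-- B replaces A's quadratic scan-and-remove loop by two counting passes, a shared min-budget,
-- and one linear skip pass per list (objective: faster).  Both Pythons mutate list1/list2 in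
-- place identically; the equivalence proved here is about the RETURN value.

-- ===== PORT A =====
-- 'for char in list1[:]' iterates the fixed copy while the state (l1, l2, flag) evolves;
-- 'list.remove' is List.erase — exact here since the 'char in l2' guard ensures presence.
def remove_match_char (list1 : List String) (list2 : List String) : List String × Bool :=
  let s := list1.foldl
    (fun (st : List String × List String × Bool) ch =>
      if st.2.1.contains ch then (st.1.erase ch, st.2.1.erase ch, true) else st)
    (list1, list2, false)
  (s.1 ++ "*" :: s.2.1, s.2.2)

-- ===== PORT B =====
-- counting loop 'c[x] = c.get(x, 0) + 1'
def pvCount (l : List String) : PySem.Dict String Int :=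
  l.foldl (fun d x => d.insert x (d.getD x 0 + 1)) PySem.Dict.empty

-- 'for x, n in c1.items(): if x in c2: shared[x] = min(n, c2[x])'
def pvShared (c1 c2 : PySem.Dict String Int) : PySem.Dict String Int :=
  c1.items.foldl
    (fun d p => if c2.contains p.1 then d.insert p.1 (min p.2 (c2.getD p.1 0)) else d)
    PySem.Dict.empty

-- the inner 'strip' pass: skip x while its budget is positive, keep it otherwise
def pvStrip (l : List String) (budget : PySem.Dict String Int) : List String :=
  (l.foldl
    (fun (st : List String × PySem.Dict String Int) x =>
      if st.2.getD x 0 > 0 then (st.1, st.2.insert x (st.2.getD x 0 - 1))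
      else (st.1 ++ [x], st.2))
    ([], budget)).1

def remove_match_char_alt (list1 : List String) (list2 : List String) : List String × Bool :=
  let c1 := pvCount list1
  let c2 := pvCount list2
  let shared := pvShared c1 c2
  let new1 := pvStrip list1 shared
  let new2 := pvStrip list2 shared
  (new1 ++ "*" :: new2, !shared.items.isEmpty)

-- ===== PRECONDITION & SPEC =====
def Spec_remove_match_char (list1 : List String) (list2 : List String) (out : List String × Bool) : Prop := out = remove_match_char_alt list1 list2
instance (list1 : List String) (list2 : List String) (out : List String × Bool) : Decidable (Spec_remove_match_char list1 list2 out) := by unfold Spec_remove_match_char; infer_instance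

-- ===== CLAIM (what is proved, stated in full; the proofs are below) =====
def Claim_equal_remove_match_char : Prop := ∀ (list1 : List String) (list2 : List String), Dom_remove_match_char list1 list2 → Spec_remove_match_char list1 list2 (remove_match_char list1 list2)

-- ===== LEMMAS AND PROOFS =====

-- mathematical form of the skip pass: for each string, drop its first (b x) occurrences
def mstrip : List String → (String → Int) → List String
  | [], _ => []
  | x :: xs, b =>
      if 0 < b x then mstrip xs (fun y => if y = x then b y - 1 else b y)
      else x :: mstrip xs b

theorem mstrip_of_nonpos (l : List String) (b : String → Int) (h : ∀ x, b x ≤ 0) :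
    mstrip l b = l := by
  induction l with
  | nil => rfl
  | cons x xs ih =>
      have hx : ¬ 0 < b x := by have := h x; omega
      simp only [mstrip]
      rw [if_neg hx]
      exact congrArg _ ih

-- removing the first occurrence of c commutes with stripping, decrementing c's budget
theorem mstrip_erase (c : String) (l : List String) : ∀ (b : String → Int), c ∈ l → 0 < b c →
    mstrip l b = mstrip (l.erase c) (fun y => if y = c then b y - 1 else b y) := by
  induction l with
  | nil => intro b h; exact absurd h List.not_mem_nil
  | cons x xs ih =>
      intro b hmem hpos
      by_cases hx : x = c
      · subst hx
        simp only [List.erase_cons_head, mstrip]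
        rw [if_pos hpos]
      · have hc : c ∈ xs := by
          rcases List.mem_cons.mp hmem with h | h
          · exact absurd h.symm hx
          · exact h
        have herase : (x :: xs).erase c = x :: xs.erase c :=
          List.erase_cons_tail (by simpa using hx)
        rw [herase]
        have hbcx : (if x = c then b x - 1 else b x) = b x := if_neg hx
        by_cases hbx : 0 < b x
        · have hbx' : 0 < (if x = c then b x - 1 else b x) := by rw [hbcx]; exact hbx
          simp only [mstrip]
          rw [if_pos hbx, if_pos hbx']
          have hpos' : 0 < (fun y => if y = x then b y - 1 else b y) c := by
            simp only [if_neg (Ne.symm hx)]; exact hpos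
          rw [ih _ hc hpos']
          congr 1
          funext y
          by_cases h1 : y = x <;> by_cases h2 : y = c <;> simp [h1, h2, hx, Ne.symm hx]
        · have hbx' : ¬ 0 < (if x = c then b x - 1 else b x) := by rw [hbcx]; exact hbx
          simp only [mstrip]
          rw [if_neg hbx, if_neg hbx']
          exact congrArg _ (ih b hc hpos)

-- the budget of A's loop: per string, min of remaining-iterations count and current-l2 count
def bmin (cs l2 : List String) : String → Int := fun x => min ((cs.count x : Int)) ((l2.count x : Int))

-- A's loop, characterised: it strips from l1 and l2 the first (bmin cs l2 x) occurrences of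
-- every x, and the flag is set iff some pending char is in l2
theorem mainA (cs : List String) : ∀ (l1 l2 : List String) (f : Bool),
    (∀ x, cs.count x ≤ l1.count x) →
    cs.foldl (fun (st : List String × List String × Bool) ch =>
        if st.2.1.contains ch then (st.1.erase ch, st.2.1.erase ch, true) else st) (l1, l2, f)
      = (mstrip l1 (bmin cs l2), mstrip l2 (bmin cs l2), f || cs.any (fun c => l2.contains c)) := by
  induction cs with
  | nil =>
      intro l1 l2 f _
      simp only [List.foldl_nil, List.any_nil, Bool.or_false]
      rw [mstrip_of_nonpos _ _ (fun x => by simp [bmin]),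
          mstrip_of_nonpos _ _ (fun x => by simp [bmin])]
  | cons c cs' ih =>
      intro l1 l2 f hinv
      by_cases hc : l2.contains c
      · have hcl2 : c ∈ l2 := by simpa using hc
        have hcl1 : c ∈ l1 := by
          have h0 := hinv c
          have h1 : List.count c (c :: cs') = List.count c cs' + 1 := by
            simp
          exact List.count_pos_iff.mp (by omega)
        simp only [List.foldl_cons, if_pos hc]
        rw [ih (l1.erase c) (l2.erase c) true (fun x => by
          by_cases hx : x = c
          · subst hx
            have h0 := hinv x
            have h1 : List.count x (x :: cs') = List.count x cs' + 1 := by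
              simp
            rw [List.count_erase_self]; omega
          · rw [List.count_erase_of_ne hx]
            have h0 := hinv x
            have h1 : List.count x (c :: cs') = List.count x cs' := by
              simp [Ne.symm hx]
            omega)]
        have hb : ∀ m : List String, c ∈ m →
            mstrip m (bmin (c :: cs') l2) = mstrip (m.erase c) (bmin cs' (l2.erase c)) := by
          intro m hm
          have h2 : 0 < List.count c l2 := List.count_pos_iff.mpr hcl2
          have hpos : 0 < bmin (c :: cs') l2 c := by
            have h1 : List.count c (c :: cs') = List.count c cs' + 1 := by
              simp
            simp only [bmin, h1]
            push_cast
            omega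
          rw [mstrip_erase c m _ hm hpos]
          congr 1
          funext y
          by_cases hy : y = c
          · subst hy
            have h1 : List.count y (y :: cs') = List.count y cs' + 1 := by
              simp
            simp only [bmin, List.count_erase_self, h1]
            push_cast
            omega
          · have h1 : List.count y (c :: cs') = List.count y cs' := by
              simp [Ne.symm hy]
            simp only [bmin, if_neg hy, List.count_erase_of_ne hy, h1]
        rw [hb l1 hcl1, hb l2 hcl2]
        have hany : ((c :: cs').any (fun c => l2.contains c)) = true := by
          simp only [List.any_cons, hc, Bool.true_or]
        rw [hany]
        simp
      · simp only [List.foldl_cons, if_neg hc]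
        rw [ih l1 l2 f (fun x => by
          have h0 := hinv x
          have h1 : List.count x cs' ≤ List.count x (c :: cs') := by
            by_cases hx : x = c
            · subst hx; simp
            · simp [Ne.symm hx]
          omega)]
        have hb : bmin (c :: cs') l2 = bmin cs' l2 := by
          funext y
          by_cases hy : y = c
          · subst hy
            have h2 : List.count y l2 = 0 := by
              rw [List.count_eq_zero]; simpa using hc
            have h1 : List.count y (y :: cs') = List.count y cs' + 1 := by
              simp
            simp only [bmin, h1, h2]
            push_cast
            omega
          · have h1 : List.count y (c :: cs') = List.count y cs' := by
              simp [Ne.symm hy]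
            simp only [bmin, h1]
        rw [hb]
        simp only [List.any_cons, hc, Bool.false_or]

-- B's skip pass, characterised: it is mstrip with the dict budget read as a function
theorem pvStrip_go (l : List String) : ∀ (acc : List String) (d : PySem.Dict String Int),
    (l.foldl (fun (st : List String × PySem.Dict String Int) x =>
        if st.2.getD x 0 > 0 then (st.1, st.2.insert x (st.2.getD x 0 - 1))
        else (st.1 ++ [x], st.2)) (acc, d)).1
      = acc ++ mstrip l (fun x => d.getD x 0) := by
  induction l with
  | nil => intro acc d; simp [mstrip]
  | cons x xs ih =>
      intro acc d
      by_cases h : d.getD x 0 > 0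
      · simp only [List.foldl_cons, if_pos h]
        rw [ih]
        simp only [mstrip, if_pos h]
        congr 2
        funext y
        rw [PySem.Dict.getD_insert]
        by_cases hy : y = x <;> simp [hy]
      · simp only [List.foldl_cons, if_neg h]
        rw [ih]
        simp only [mstrip, if_neg h, List.append_assoc, List.singleton_append]

theorem pvStrip_eq (l : List String) (d : PySem.Dict String Int) :
    pvStrip l d = mstrip l (fun x => d.getD x 0) := by
  simpa using pvStrip_go l [] d

-- the shared-budget fold, read back through getD
theorem sharedFold_getD (c2 : PySem.Dict String Int) (f : String → Int) (x : String) :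
    ∀ (S : List String) (d : PySem.Dict String Int), S.Nodup →
    ((S.map (fun k => (k, f k))).foldl
        (fun d p => if c2.contains p.1 then d.insert p.1 (min p.2 (c2.getD p.1 0)) else d) d).getD x 0
      = if x ∈ S ∧ c2.contains x then min (f x) (c2.getD x 0) else d.getD x 0 := by
  intro S
  induction S with
  | nil => intro d _; simp
  | cons k S' ih =>
      intro d hnd
      have hk_not : k ∉ S' := (List.nodup_cons.mp hnd).1
      have hnd' : S'.Nodup := (List.nodup_cons.mp hnd).2
      simp only [List.map_cons, List.foldl_cons]
      by_cases hk : c2.contains k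
      · rw [if_pos hk, ih _ hnd']
        by_cases hxS : x ∈ S'
        · have hxk : x ≠ k := fun h => hk_not (h ▸ hxS)
          by_cases hcx : c2.contains x
          · rw [if_pos ⟨hxS, hcx⟩, if_pos ⟨List.mem_cons_of_mem _ hxS, hcx⟩]
          · rw [if_neg (fun h => hcx h.2), if_neg (fun h => hcx h.2),
                PySem.Dict.getD_insert, if_neg hxk]
        · rw [if_neg (fun h => hxS h.1)]
          by_cases hxk : x = k
          · subst hxk
            rw [PySem.Dict.getD_insert, if_pos rfl,
                if_pos ⟨List.mem_cons.mpr (Or.inl rfl), hk⟩]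
          · rw [PySem.Dict.getD_insert, if_neg hxk,
                if_neg (fun h => (List.mem_cons.mp h.1).elim hxk hxS)]
      · rw [if_neg hk, ih _ hnd']
        by_cases hcx : c2.contains x
        · have hxk : x ≠ k := fun h => hk (h ▸ hcx)
          by_cases hxS : x ∈ S'
          · rw [if_pos ⟨hxS, hcx⟩, if_pos ⟨List.mem_cons_of_mem _ hxS, hcx⟩]
          · rw [if_neg (fun h => hxS h.1),
                if_neg (fun h => (List.mem_cons.mp h.1).elim hxk hxS)]
        · rw [if_neg (fun h => hcx h.2), if_neg (fun h => hcx h.2)]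

-- the shared-budget fold is empty iff nothing fed to it passes the membership test
theorem insert_items_ne_nil (d : PySem.Dict String Int) (k : String) (v : Int) :
    (d.insert k v).items ≠ [] := by
  intro h
  have hk : k ∈ (d.insert k v).keys := by rw [PySem.Dict.mem_keys_insert]; left; rfl
  simp only [PySem.Dict.keys, h, List.map_nil, List.not_mem_nil] at hk

theorem sharedFold_items_nil (c2 : PySem.Dict String Int) (f : String → Int) :
    ∀ (S : List String) (d : PySem.Dict String Int),
    (((S.map (fun k => (k, f k))).foldl
        (fun d p => if c2.contains p.1 then d.insert p.1 (min p.2 (c2.getD p.1 0)) else d) d).items = []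
      ↔ d.items = [] ∧ ∀ k ∈ S, c2.contains k = false) := by
  intro S
  induction S with
  | nil => intro d; simp
  | cons k S' ih =>
      intro d
      simp only [List.map_cons, List.foldl_cons]
      by_cases hk : c2.contains k
      · rw [if_pos hk, ih]
        constructor
        · rintro ⟨h, -⟩; exact absurd h (insert_items_ne_nil d k _)
        · rintro ⟨-, h⟩; exact absurd hk (by simpa using h k (by simp))
      · rw [if_neg hk, ih]
        constructor
        · rintro ⟨h1, h2⟩
          refine ⟨h1, fun x hx => ?_⟩
          rcases List.mem_cons.mp hx with h | h
          · subst h; simpa using hk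
          · exact h2 x h
        · rintro ⟨h1, h2⟩; exact ⟨h1, fun x hx => h2 x (List.mem_cons_of_mem _ hx)⟩

-- shared's budget is exactly the pointwise minimum of the two counts
theorem shared_getD (l1 l2 : List String) (x : String) :
    (pvShared (PySem.Dict.counter l1) (PySem.Dict.counter l2)).getD x 0
      = min ((l1.count x : Int)) ((l2.count x : Int)) := by
  unfold pvShared
  rw [PySem.Dict.items_counter,
      sharedFold_getD _ _ _ _ _ (PySem.Set.nodup_ofList l1)]
  by_cases h1 : x ∈ PySem.Set.ofList l1
  · by_cases h2 : (PySem.Dict.counter l2).contains x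
    · rw [if_pos ⟨h1, h2⟩, PySem.Dict.getD_counter]
    · rw [if_neg (fun h => h2 h.2), PySem.Dict.getD_empty]
      have hx2 : List.count x l2 = 0 := by
        rw [List.count_eq_zero]
        intro hm
        exact h2 (by rw [PySem.Dict.contains_counter]; simpa using hm)
      rw [hx2]
      omega
  · rw [if_neg (fun h => h1 h.1), PySem.Dict.getD_empty]
    have hx1 : List.count x l1 = 0 := by
      rw [List.count_eq_zero]
      intro hm
      exact h1 ((PySem.Set.mem_ofList l1 x).mpr hm)
    rw [hx1]
    omega

theorem flag_eq (l1 l2 : List String) :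
    (!(pvShared (PySem.Dict.counter l1) (PySem.Dict.counter l2)).items.isEmpty)
      = l1.any (fun c => l2.contains c) := by
  unfold pvShared
  rw [PySem.Dict.items_counter]
  have h := sharedFold_items_nil (PySem.Dict.counter l2)
      (fun k => ((List.count k l1 : Int))) (PySem.Set.ofList l1) PySem.Dict.empty
  cases hany : l1.any (fun c => l2.contains c) with
  | true =>
      rcases List.any_eq_true.mp hany with ⟨c, hc1, hc2⟩
      have hne : ¬ (((PySem.Set.ofList l1).map
          (fun k => (k, ((List.count k l1 : Int))))).foldl
            (fun d p => if (PySem.Dict.counter l2).contains p.1 then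
              d.insert p.1 (min p.2 ((PySem.Dict.counter l2).getD p.1 0)) else d)
            PySem.Dict.empty).items = [] := by
        rw [h]
        rintro ⟨-, hall⟩
        have hcc := hall c ((PySem.Set.mem_ofList l1 c).mpr hc1)
        rw [PySem.Dict.contains_counter] at hcc
        rw [hcc] at hc2
        exact Bool.false_ne_true hc2
      simpa [List.isEmpty_iff] using hne
  | false =>
      have hall : ∀ k ∈ l1, l2.contains k = false := by
        intro k hk
        have := List.any_eq_false.mp hany k hk
        simpa using this
      have hnil : (((PySem.Set.ofList l1).map
          (fun k => (k, ((List.count k l1 : Int))))).foldl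
            (fun d p => if (PySem.Dict.counter l2).contains p.1 then
              d.insert p.1 (min p.2 ((PySem.Dict.counter l2).getD p.1 0)) else d)
            PySem.Dict.empty).items = [] := by
        rw [h]
        exact ⟨rfl, fun k hk => by
          rw [PySem.Dict.contains_counter]
          exact hall k ((PySem.Set.mem_ofList l1 k).mp hk)⟩
      rw [hnil]
      rfl

-- ===== VERDICT (by name: the statement is the Claim_ definition above) =====
theorem remove_match_char_spec : Claim_equal_remove_match_char := by
  intro l1 l2 _
  show remove_match_char l1 l2 = remove_match_char_alt l1 l2
  have hA : remove_match_char l1 l2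
      = (mstrip l1 (bmin l1 l2) ++ "*" :: mstrip l2 (bmin l1 l2),
          l1.any (fun c => l2.contains c)) := by
    simp only [remove_match_char]
    rw [mainA l1 l1 l2 false (fun x => le_refl _)]
    simp
  have hbf : (fun x => (pvShared (PySem.Dict.counter l1) (PySem.Dict.counter l2)).getD x 0)
      = bmin l1 l2 := by
    funext x
    rw [shared_getD]
    rfl
  have hB : remove_match_char_alt l1 l2
      = (mstrip l1 (bmin l1 l2) ++ "*" :: mstrip l2 (bmin l1 l2),
          l1.any (fun c => l2.contains c)) := by
    simp only [remove_match_char_alt, pvCount,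
      PySem.Dict.foldl_insert_getD_add_one_eq_counter]
    rw [pvStrip_eq, pvStrip_eq, flag_eq, hbf]
  rw [hA, hB]
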